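-- pv_equiv track=rewrite | github.com/rachel5004/Algorithm | Naver/Q1_test.py | solution
-- ===== SOURCE A (Python) =====
-- def solution(lst,k):
--     res=0
--     dic = {}
--     for i in lst:
--         tmp = list(set(i.split()))
--         for j in tmp:
--             if j in dic.keys(): dic[j]+=1
--             else: dic[j]=1
--     for i in dic.values():
--         if i>k:i=k
--         res+=i
--     return res
-- ===== SOURCE B (Python) =====
-- def solution(lst, k):
--     # Sort all per-line-distinct word occurrences, then scan runs of equal
--     # words: each run of length r contributes min(r, k) (even for k <= 0).
--     occ = sorted(w for line in lst for w in set(line.split()))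
--     res = 0
--     while occ:
--         w = occ[0]
--         run = 1
--         while run < len(occ) and occ[run] == w:
--             run += 1
--         res += run if run < k else k
--         occ = occ[run:]
--     return res
-- ===== Notes on version B (the rewrite author's own statement) =====
-- stated objective: alternative
-- what changed: B replaces A's dict-counting plus second value pass by sort-then-scan: it sorts the flattened list of per-line-distinct word occurrences and sums min(run length, k) over maximal runs of equal words, using no dictionary at all.
import Mathlib
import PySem

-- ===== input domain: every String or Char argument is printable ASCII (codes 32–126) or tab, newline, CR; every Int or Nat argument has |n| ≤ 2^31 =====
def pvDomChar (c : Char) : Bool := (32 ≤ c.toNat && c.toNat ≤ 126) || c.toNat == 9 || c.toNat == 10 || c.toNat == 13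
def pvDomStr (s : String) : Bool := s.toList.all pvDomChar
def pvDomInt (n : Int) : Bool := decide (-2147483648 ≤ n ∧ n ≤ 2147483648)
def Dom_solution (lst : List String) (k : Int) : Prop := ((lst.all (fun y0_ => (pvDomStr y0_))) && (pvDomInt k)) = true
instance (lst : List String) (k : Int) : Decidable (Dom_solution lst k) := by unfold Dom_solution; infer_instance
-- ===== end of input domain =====

-- B replaces A's dict-counting plus second value pass by sort-then-scan over the
-- flattened per-line-distinct word occurrences, summing min(run length, k) per run.

-- ===== PORT A =====
def solution (lst : List String) (k : Int) : Int :=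
  let dic : PySem.Dict String Int :=
    lst.foldl (fun dic i =>
        (PySem.Set.ofList (PySem.Str.split₀ i)).foldl
          (fun dic j =>
            if dic.contains j then dic.modify j 0 (· + 1) else dic.insert j 1)
          dic)
      PySem.Dict.empty
  dic.values.foldl (fun res i => res + (if i > k then k else i)) 0

-- ===== PORT B =====
-- the inner while loop of Source B: how many further leading copies of w follow
def runLen (w : String) : List String → Nat
  | [] => 0
  | x :: xs => if x = w then runLen w xs + 1 else 0

-- the outer while loop of Source B: take the first run, add min(run, k), slice it off
def runsSum (k : Int) : List String → Int
  | [] => 0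
  | w :: rest =>
      let run : Int := 1 + (runLen w rest : Int)
      (if run < k then run else k) + runsSum k (rest.drop (runLen w rest))
termination_by l => l.length
decreasing_by
  simp only [List.length_drop, List.length_cons]
  omega

def solution_alt (lst : List String) (k : Int) : Int :=
  runsSum k
    (PySem.List.sorted
      (lst.flatMap (fun line => PySem.Set.ofList (PySem.Str.split₀ line)))
      (fun w => w) false)

-- ===== PRECONDITION & SPEC =====
def Spec_solution (lst : List String) (k : Int) (out : Int) : Prop := out = solution_alt lst k
instance (lst : List String) (k : Int) (out : Int) : Decidable (Spec_solution lst k out) := by unfold Spec_solution; infer_instance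

-- ===== CLAIM (what is proved, stated in full; the proofs are below) =====
def Claim_equal_solution : Prop := ∀ (lst : List String) (k : Int), Dom_solution lst k → Spec_solution lst k (solution lst k)

-- ===== LEMMAS AND PROOFS =====

-- A's dict step is exactly "insert j (current count + 1)".
theorem stepA_eq (d : PySem.Dict String Int) (j : String) :
    (if d.contains j then d.modify j 0 (· + 1) else d.insert j 1)
      = d.insert j (d.getD j 0 + 1) := by
  by_cases h : d.contains j = true
  · simp [h, PySem.Dict.modify]
  · have h' : d.contains j = false := by simpa using h
    rw [if_neg (by simp [h']), PySem.Dict.getD_of_not_contains d 0 h']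
    norm_num

-- capped sum of per-word counts, the common value of both programs
def capSum (k : Int) (l : List String) : Int :=
  ((PySem.List.dedup l).map (fun w => min ((l.count w : Nat) : Int) k)).sum

theorem runLen_take (w : String) (l : List String) :
    l.take (runLen w l) = List.replicate (runLen w l) w := by
  induction l with
  | nil => simp [runLen]
  | cons x xs ih =>
    by_cases h : x = w
    · subst h
      simp [runLen, List.take_succ_cons, List.replicate_succ, ih]
    · simp [runLen, h]

theorem runLen_drop_head (w : String) (l : List String) (x : String) (t : List String)
    (h : l.drop (runLen w l) = x :: t) : x ≠ w := by
  induction l with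
  | nil => simp [runLen] at h
  | cons y ys ih =>
    by_cases hy : y = w
    · subst hy
      have h' : ys.drop (runLen y ys) = x :: t := by
        simpa [runLen, List.drop_succ_cons] using h
      exact ih h'
    · simp [runLen, hy] at h
      rw [← h.1]
      exact fun hc => hy hc

theorem not_mem_drop (w : String) (rest : List String)
    (hp : rest.Pairwise (· ≤ ·)) (hle : ∀ x ∈ rest, w ≤ x) :
    w ∉ rest.drop (runLen w rest) := by
  cases hd : rest.drop (runLen w rest) with
  | nil => simp
  | cons x t =>
    have hxne : x ≠ w := runLen_drop_head w rest x t hd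
    have hxmem : x ∈ rest := by
      have : x ∈ rest.drop (runLen w rest) := by rw [hd]; exact List.mem_cons_self
      exact List.mem_of_mem_drop this
    have hwx : w < x := lt_of_le_of_ne (hle x hxmem) (Ne.symm hxne)
    have hpd : (x :: t).Pairwise (· ≤ ·) := by
      rw [← hd]; exact hp.sublist (List.drop_sublist _ _)
    intro hm
    rcases List.mem_cons.mp hm with h | h
    · exact hxne h.symm
    · exact absurd (lt_of_lt_of_le hwx ((List.pairwise_cons.mp hpd).1 w h)) (lt_irrefl w)

theorem count_head (w : String) (rest : List String)
    (hnd : w ∉ rest.drop (runLen w rest)) :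
    (w :: rest).count w = 1 + runLen w rest := by
  have hsplit : rest = rest.take (runLen w rest) ++ rest.drop (runLen w rest) :=
    (List.take_append_drop _ _).symm
  rw [List.count_cons_self]
  conv_lhs => rw [hsplit]
  rw [List.count_append, runLen_take, List.count_replicate_self,
      List.count_eq_zero_of_not_mem hnd]
  omega

theorem count_other (w u : String) (rest : List String) (hu : u ≠ w) :
    (w :: rest).count u = (rest.drop (runLen w rest)).count u := by
  have h0 : (rest.take (runLen w rest)).count u = 0 := by
    rw [runLen_take]
    exact List.count_eq_zero_of_not_mem (fun hm => hu (List.eq_of_mem_replicate hm))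
  have hc : rest.count u = (rest.drop (runLen w rest)).count u := by
    conv_lhs => rw [← List.take_append_drop (runLen w rest) rest]
    rw [List.count_append, h0, Nat.zero_add]
  rw [List.count_cons, hc]
  simp [Ne.symm hu]

-- membership in the whole list = the run's head or the remainder after the run
theorem mem_or_drop (w u : String) (rest : List String) :
    (u = w ∨ u ∈ rest) ↔ (u = w ∨ u ∈ rest.drop (runLen w rest)) := by
  constructor
  · rintro (h | h)
    · exact Or.inl h
    · by_cases hu : u = w
      · exact Or.inl hu
      · right
        have hsplit : rest = rest.take (runLen w rest) ++ rest.drop (runLen w rest) :=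
          (List.take_append_drop _ _).symm
        rw [hsplit] at h
        rcases List.mem_append.mp h with h | h
        · rw [runLen_take] at h
          exact absurd (List.eq_of_mem_replicate h) hu
        · exact h
  · rintro (h | h)
    · exact Or.inl h
    · exact Or.inr (List.mem_of_mem_drop h)

-- the scan over a sorted (Pairwise ≤) list computes the capped per-word sum
theorem runsSum_eq_capSum (k : Int) (l : List String) (hp : l.Pairwise (· ≤ ·)) :
    runsSum k l = capSum k l := by
  induction hn : l.length using Nat.strong_induction_on generalizing l with
  | _ n ih =>
    cases l with
    | nil =>
      rw [runsSum.eq_def]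
      rfl
    | cons w rest =>
      have hprest : rest.Pairwise (· ≤ ·) := (List.pairwise_cons.mp hp).2
      have hle : ∀ x ∈ rest, w ≤ x := (List.pairwise_cons.mp hp).1
      set d := rest.drop (runLen w rest) with hd
      have hwd : w ∉ d := not_mem_drop w rest hprest hle
      have hpd : d.Pairwise (· ≤ ·) := hprest.sublist (List.drop_sublist _ _)
      have hlen : d.length < n := by
        have h2 : rest.length + 1 = n := by simpa using hn
        simp only [hd, List.length_drop]
        omega
      have ihd := ih d.length hlen d hpd rfl
      have hperm : (PySem.List.dedup (w :: rest)).Perm (w :: PySem.List.dedup d) := by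
        rw [List.perm_ext_iff_of_nodup (PySem.List.nodup_dedup _)
          (by simp only [List.nodup_cons]
              exact ⟨fun h => hwd ((PySem.List.mem_dedup _ _).mp h),
                PySem.List.nodup_dedup _⟩)]
        intro u
        simp only [PySem.List.mem_dedup, List.mem_cons]
        exact mem_or_drop w u rest
      have hsum := (hperm.map (fun u => min (((w :: rest).count u : Nat) : Int) k)).sum_eq
      have hrs : runsSum k (w :: rest)
          = (if 1 + (runLen w rest : Int) < k then 1 + (runLen w rest : Int) else k)
            + runsSum k (rest.drop (runLen w rest)) := by
        rw [runsSum.eq_def]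
      unfold capSum
      rw [hsum]
      simp only [List.map_cons, List.sum_cons]
      have hcw : (w :: rest).count w = 1 + runLen w rest := count_head w rest hwd
      have hmapeq : (PySem.List.dedup d).map (fun u => min (((w :: rest).count u : Nat) : Int) k)
          = (PySem.List.dedup d).map (fun u => min ((d.count u : Nat) : Int) k) := by
        apply List.map_congr_left
        intro u hu
        have humem : u ∈ d := (PySem.List.mem_dedup _ _).mp hu
        have hune : u ≠ w := fun h => hwd (h ▸ humem)
        rw [hd, ← count_other w u rest hune]
      rw [hmapeq, hrs, ← hd, ihd, hcw]
      unfold capSum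
      have hcast : ((1 + runLen w rest : Nat) : Int) = 1 + (runLen w rest : Int) := by
        push_cast; ring
      rw [hcast]
      have harith : (if 1 + (runLen w rest : Int) < k then 1 + (runLen w rest : Int) else k)
          = min (1 + (runLen w rest : Int)) k := by
        split_ifs with h <;> omega
      rw [harith]

-- capSum is invariant under permutation of the occurrence list
theorem capSum_perm (k : Int) (l₁ l₂ : List String) (h : l₁.Perm l₂) :
    capSum k l₁ = capSum k l₂ := by
  have hdperm : (PySem.List.dedup l₁).Perm (PySem.List.dedup l₂) := by
    rw [List.perm_ext_iff_of_nodup (PySem.List.nodup_dedup _) (PySem.List.nodup_dedup _)]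
    intro u
    simp only [PySem.List.mem_dedup]
    exact h.mem_iff
  unfold capSum
  have hmapeq : (PySem.List.dedup l₁).map (fun w => min ((l₁.count w : Nat) : Int) k)
      = (PySem.List.dedup l₁).map (fun w => min ((l₂.count w : Nat) : Int) k) := by
    apply List.map_congr_left
    intro u _
    rw [h.count_eq]
  rw [hmapeq]
  exact (hdperm.map _).sum_eq

-- A's nested loop is the counting loop over the flattened occurrence list
theorem foldl_nested_eq (l : List String) (d : PySem.Dict String Int) :
    List.foldl (fun dic i =>
        List.foldl (fun dic j => dic.insert j (dic.getD j 0 + 1)) dic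
          (PySem.Set.ofList (PySem.Str.split₀ i))) d l
      = List.foldl (fun dic j => dic.insert j (dic.getD j 0 + 1)) d
          (l.flatMap (fun line => PySem.Set.ofList (PySem.Str.split₀ line))) := by
  induction l generalizing d with
  | nil => rfl
  | cons x xs ih => simp [List.flatMap_cons, List.foldl_append, ih]

-- A's second pass over the values is the capped sum of the values
theorem passA (k : Int) (xs : List Int) :
    xs.foldl (fun res i => res + (if i > k then k else i)) 0
      = (xs.map (fun v => min v k)).sum := by
  rw [PySem.List.foldl_add (g := fun i => if i > k then k else i)]
  have h : xs.map (fun i => if i > k then k else i) = xs.map (fun v => min v k) := by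
    apply List.map_congr_left
    intro v _
    split_ifs with h <;> omega
  rw [h]
  ring

-- ===== VERDICT (by name: the statement is the Claim_ definition above) =====
theorem solution_spec : Claim_equal_solution := by
  unfold Claim_equal_solution Spec_solution
  intro lst k _
  have hA : solution lst k
      = capSum k (lst.flatMap (fun line => PySem.Set.ofList (PySem.Str.split₀ line))) := by
    unfold solution
    simp only [stepA_eq]
    rw [foldl_nested_eq lst PySem.Dict.empty,
      PySem.Dict.foldl_insert_getD_add_one_eq_counter]
    set occ : List String :=
      lst.flatMap (fun line => PySem.Set.ofList (PySem.Str.split₀ line)) with hocc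
    have hv : (PySem.Dict.counter occ).values
        = (PySem.List.dedup occ).map (fun w => ((occ.count w : Nat) : Int)) := by
      show ((PySem.Dict.counter occ).items.map (·.2)) = _
      rw [PySem.Dict.items_counter, List.map_map, ← PySem.List.dedup_eq_ofList]
      rfl
    rw [hv, passA, List.map_map]
    rfl
  have hB : solution_alt lst k
      = capSum k (lst.flatMap (fun line => PySem.Set.ofList (PySem.Str.split₀ line))) := by
    unfold solution_alt
    rw [runsSum_eq_capSum k _ (by
      simpa using PySem.List.sorted_pairwise
        (lst.flatMap (fun line => PySem.Set.ofList (PySem.Str.split₀ line))) (fun w => w))]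
    exact capSum_perm k _ _ (PySem.List.sorted_perm _ _ _)
  rw [hA, hB]
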